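-- pv_equiv track=rewrite | github.com/wangannie/advent-of-code | 2020/23.py | find_dest_index
-- ===== SOURCE A (Python) =====
-- def find_dest_index(cups, current):
--     possible = sorted(cups[:current] + cups[current + 1:])
--     max_dest, min_dest = max(possible), min(possible)
--     check = cups[current] - 1
--     while True:
--         if check < min_dest:
--             check = max_dest
--         if check in possible:
--             return cups.index(check)
--         else:
--             check -= 1
-- ===== SOURCE B (Python) =====
-- def find_dest_index(cups, current):
--     possible = cups[:current] + cups[current + 1:]
--     cur = cups[current]
--     smaller = [v for v in possible if v < cur]
--     dest = max(smaller) if smaller else max(possible)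
--     return cups.index(dest)
-- ===== Notes on version B (the rewrite author's own statement) =====
-- stated objective: simpler
-- what changed: Replaces A's decrement-and-wrap search loop (plus the sort it scans) with a single filtered max: dest = max of the removed cups below cups[current], or the overall max if none.
import Mathlib
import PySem

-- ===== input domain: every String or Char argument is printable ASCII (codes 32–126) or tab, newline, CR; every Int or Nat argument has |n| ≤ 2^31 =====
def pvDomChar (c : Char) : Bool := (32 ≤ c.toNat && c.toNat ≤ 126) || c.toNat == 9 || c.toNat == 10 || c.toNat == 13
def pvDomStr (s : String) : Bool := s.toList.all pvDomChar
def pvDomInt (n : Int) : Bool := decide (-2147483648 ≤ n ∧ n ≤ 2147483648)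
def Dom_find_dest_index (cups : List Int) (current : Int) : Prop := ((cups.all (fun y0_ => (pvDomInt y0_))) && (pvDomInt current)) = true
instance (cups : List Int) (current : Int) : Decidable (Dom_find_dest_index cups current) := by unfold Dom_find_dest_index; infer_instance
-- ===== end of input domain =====

-- B replaces A's decrement-and-wrap search loop (and the sort it scans) with a single
-- filtered max selection over the removed cups; objective: simpler.


-- ===== PORT A =====
-- the 'while True' loop of A: check wraps to max_dest when it falls below min_dest,
-- returns cups.index(check) as soon as check ∈ possible, else decrements.
-- fuel only makes the recursion total; inside Pre_ it is always sufficient.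
def fdiLoop (cups possible : List Int) (mx mn : Int) : Int → Nat → Int
  | _, 0 => 0
  | check, fuel + 1 =>
    let c := if check < mn then mx else check
    if c ∈ possible then
      match PySem.List.index? cups c with
      | some k => (k : Int)
      | none => 0
    else fdiLoop cups possible mx mn (c - 1) fuel

def find_dest_index (cups : List Int) (current : Int) : Int :=
  let possible := PySem.List.sorted
    (PySem.List.slice cups none (some current) ++ PySem.List.slice cups (some (current + 1)) none)
    (fun x => x) false
  match PySem.List.max? possible (fun x => x), PySem.List.min? possible (fun x => x),
        PySem.List.pyGet? cups current with
  | some mx, some mn, some cv => fdiLoop cups possible mx mn (cv - 1) ((cv - 1 - mn).toNat + 2)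
  | _, _, _ => 0

-- ===== PORT B =====
def find_dest_index_alt (cups : List Int) (current : Int) : Int :=
  let possible := PySem.List.slice cups none (some current) ++ PySem.List.slice cups (some (current + 1)) none
  match PySem.List.pyGet? cups current with
  | some cur =>
    let smaller := possible.filter (fun v => decide (v < cur))
    match (if smaller ≠ [] then PySem.List.max? smaller (fun x => x) else PySem.List.max? possible (fun x => x)) with
    | some dest =>
      match PySem.List.index? cups dest with
      | some k => (k : Int)
      | none => 0
    | none => 0
  | none => 0

-- ===== PRECONDITION & SPEC =====
-- Pre_ excludes exactly the inputs on which Python A raises: an out-of-range index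
-- current (IndexError at cups[current]) or an empty rest list cups[:current]+cups[current+1:]
-- (ValueError at max([])).
def Pre_find_dest_index (cups : List Int) (current : Int) : Prop :=
  (PySem.List.slice cups none (some current) ++ PySem.List.slice cups (some (current + 1)) none) ≠ []
  ∧ PySem.Raise.InRange cups.length current
instance (cups : List Int) (current : Int) : Decidable (Pre_find_dest_index cups current) := by
  unfold Pre_find_dest_index; infer_instance

def pvWitness_find_dest_index : List Int × Int := ([3, 8, 9, 1, 2, 5], 0)

def Spec_find_dest_index (cups : List Int) (current : Int) (out : Int) : Prop := out = find_dest_index_alt cups current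
instance (cups : List Int) (current : Int) (out : Int) : Decidable (Spec_find_dest_index cups current out) := by unfold Spec_find_dest_index; infer_instance

-- ===== CLAIM (what is proved, stated in full; the proofs are below) =====
def Claim_equal_find_dest_index : Prop := ∀ (cups : List Int) (current : Int), Dom_find_dest_index cups current → Pre_find_dest_index cups current → Spec_find_dest_index cups current (find_dest_index cups current)

-- ===== LEMMAS AND PROOFS =====

-- with the identity key, max? is permutation-invariant (the maximal VALUE is unique)
theorem max?_id_eq_of_perm {xs ys : List Int} (h : xs.Perm ys) :
    PySem.List.max? xs (fun x => x) = PySem.List.max? ys (fun x => x) := by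
  match h1 : PySem.List.max? xs (fun x => x), h2 : PySem.List.max? ys (fun x => x) with
  | none, none => rfl
  | none, some m =>
    rw [PySem.List.max?_eq_none_iff] at h1
    have := PySem.List.max?_mem h2
    simp [h1] at h
    simp [h] at this
  | some m, none =>
    rw [PySem.List.max?_eq_none_iff] at h2
    have := PySem.List.max?_mem h1
    simp [h2] at h
    simp [h] at this
  | some m, some m' =>
    have hm := PySem.List.max?_mem h1
    have hm' := PySem.List.max?_mem h2
    have h1' := PySem.List.max?_isMax h1
    have h2' := PySem.List.max?_isMax h2
    have a1 : m ≤ m' := h2' m (h.mem_iff.mp hm)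
    have a2 : m' ≤ m := h1' m' (h.mem_iff.mpr hm')
    simp [le_antisymm a1 a2]

-- characterisation of A's loop
theorem fdiLoop_spec (cups S : List Int) (mx mn cv : Int) (check : Int) (fuel : Nat)
    (hmx : mx ∈ S)
    (hmn : mn ∈ S) (hmnmin : ∀ y ∈ S, mn ≤ y)
    (hcheck : check ≤ cv - 1)
    (hinv : ∀ y ∈ S, y < cv → y ≤ check)
    (hfuel : (check - mn).toNat < fuel) :
    fdiLoop cups S mx mn check fuel =
      match PySem.List.max? (S.filter (fun v => decide (v < cv))) (fun x => x) with
      | some d => (match PySem.List.index? cups d with | some k => (k : Int) | none => 0)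
      | none => (match PySem.List.index? cups mx with | some k => (k : Int) | none => 0) := by
  induction fuel generalizing check with
  | zero => omega
  | succ n ih =>
    simp only [fdiLoop]
    by_cases hw : check < mn
    · -- wrap: no element of S is < cv, the filter is empty, loop returns index of mx
      have hfe : S.filter (fun v => decide (v < cv)) = [] := by
        rw [List.filter_eq_nil_iff]
        intro y hy hlt
        have h1 := hinv y hy (by simpa using hlt)
        have h2 := hmnmin y hy
        omega
      rw [hfe, if_pos hw, if_pos hmx,
        show PySem.List.max? ([] : List Int) (fun x => x) = none from
          (PySem.List.max?_eq_none_iff [] (fun x => x)).mpr rfl]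
    · rw [if_neg hw]
      by_cases hmem : check ∈ S
      · -- found: check is the max of the filtered list, return its index
        rw [if_pos hmem]
        have hcf : check ∈ S.filter (fun v => decide (v < cv)) := by
          rw [List.mem_filter]; exact ⟨hmem, by simp; omega⟩
        match h1 : PySem.List.max? (S.filter (fun v => decide (v < cv))) (fun x => x) with
        | none =>
          rw [PySem.List.max?_eq_none_iff] at h1
          rw [h1] at hcf; simp at hcf
        | some d =>
          have hd := PySem.List.max?_mem h1
          rw [List.mem_filter] at hd
          have a1 : d ≤ check := hinv d hd.1 (by simpa using hd.2)
          have a2 : check ≤ d := PySem.List.max?_isMax h1 check hcf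
          rw [show d = check from le_antisymm a1 a2]
      · -- not present: decrement and recurse
        rw [if_neg hmem]
        have hne : check ≠ mn := fun h => hmem (h ▸ hmn)
        refine ih (check - 1) (by omega) (fun y hy hlt => ?_) (by omega)
        have h1 := hinv y hy hlt
        rcases eq_or_lt_of_le h1 with h | h
        · exact absurd (h ▸ hy) hmem
        · omega

-- ===== VERDICT (by name: the statement is the Claim_ definition above) =====
theorem find_dest_index_spec : Claim_equal_find_dest_index := by
  intro cups current _ hpre
  obtain ⟨hPne, hrange⟩ := hpre
  unfold Spec_find_dest_index find_dest_index find_dest_index_alt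
  set P := PySem.List.slice cups none (some current) ++
    PySem.List.slice cups (some (current + 1)) none with hP
  set S := PySem.List.sorted P (fun x => x) false with hS
  have hperm : S.Perm P := PySem.List.sorted_perm P (fun x => x) false
  have hSne : S ≠ [] := by
    intro h
    exact hPne ((PySem.List.sorted_eq_nil_iff P (fun x => x) false).mp h)
  obtain ⟨cv, hcv⟩ : ∃ cv, PySem.List.pyGet? cups current = some cv := by
    cases h : PySem.List.pyGet? cups current with
    | none => rw [PySem.List.pyGet?_eq_none_iff] at h; exact absurd hrange h
    | some cv => exact ⟨cv, rfl⟩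
  obtain ⟨mx, hmx⟩ : ∃ mx, PySem.List.max? S (fun x => x) = some mx := by
    cases h : PySem.List.max? S (fun x => x) with
    | none => rw [PySem.List.max?_eq_none_iff] at h; exact absurd h hSne
    | some mx => exact ⟨mx, rfl⟩
  obtain ⟨mn, hmn⟩ : ∃ mn, PySem.List.min? S (fun x => x) = some mn := by
    cases h : PySem.List.min? S (fun x => x) with
    | none => rw [PySem.List.min?_eq_none_iff] at h; exact absurd h hSne
    | some mn => exact ⟨mn, rfl⟩
  simp only [hmx, hmn, hcv]
  rw [fdiLoop_spec cups S mx mn cv (cv - 1) ((cv - 1 - mn).toNat + 2)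
    (PySem.List.max?_mem hmx) (PySem.List.min?_mem hmn)
    (PySem.List.min?_isMin hmn) le_rfl
    (fun y _ hy => by omega) (by omega)]
  have hfperm : (S.filter (fun v => decide (v < cv))).Perm
      (P.filter (fun v => decide (v < cv))) := hperm.filter _
  rw [max?_id_eq_of_perm hfperm]
  by_cases hfe : P.filter (fun v => decide (v < cv)) = []
  · -- no smaller cup: both sides pick the overall max
    rw [hfe, if_neg (by simp),
      show PySem.List.max? ([] : List Int) (fun x => x) = none from
        (PySem.List.max?_eq_none_iff [] (fun x => x)).mpr rfl,
      ← max?_id_eq_of_perm hperm, hmx]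
  · rw [if_pos hfe]
    cases h : PySem.List.max? (List.filter (fun v => decide (v < cv)) P) (fun x => x) with
    | none => rw [PySem.List.max?_eq_none_iff] at h; exact absurd h hfe
    | some d => rfl
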